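-- pv_equiv track=rewrite | github.com/ViperJuice/Code-Index-MCP | config_plugin_validation.py | _extract_markdown_headers
-- ===== SOURCE A (Python) =====
-- from typing import Dict, List, Any
--
-- def _extract_markdown_headers(content: str) -> Dict[str, int]:
--     """Extract header levels from Markdown content."""
--     headers = {'h1': 0, 'h2': 0, 'h3': 0, 'h4': 0, 'h5': 0, 'h6': 0}
--
--     for line in content.split('\n'):
--         line = line.strip()
--         if line.startswith('#'):
--             level = len(line) - len(line.lstrip('#'))
--             if 1 <= level <= 6:
--                 headers[f'h{level}'] += 1
--
--     return headers
-- ===== SOURCE B (Python) =====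
-- def _extract_markdown_headers(content: str):
--     """Single pass over the characters: per line, skip leading whitespace,
--     count the run of '#', then jump to the next newline. No split/strip,
--     no per-line string allocations."""
--     counts = [0, 0, 0, 0, 0, 0, 0]
--     i, n = 0, len(content)
--     while i < n:
--         while i < n and content[i] != '\n' and content[i].isspace():
--             i += 1
--         level = 0
--         while i < n and content[i] == '#':
--             level += 1
--             i += 1
--         if 1 <= level <= 6:
--             counts[level] += 1
--         while i < n and content[i] != '\n':
--             i += 1
--         i += 1
--     return {f'h{k}': counts[k] for k in range(1, 7)}
-- ===== Notes on version B (the rewrite author's own statement) =====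
-- stated objective: alternative
-- what changed: replaces the split('\n')/strip()/lstrip('#') per-line string pipeline with dict accumulation by a single index-based character scan (skip whitespace, count the '#' run, jump to the next newline) into a plain counts array, building the result dict once at the end
import Mathlib
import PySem

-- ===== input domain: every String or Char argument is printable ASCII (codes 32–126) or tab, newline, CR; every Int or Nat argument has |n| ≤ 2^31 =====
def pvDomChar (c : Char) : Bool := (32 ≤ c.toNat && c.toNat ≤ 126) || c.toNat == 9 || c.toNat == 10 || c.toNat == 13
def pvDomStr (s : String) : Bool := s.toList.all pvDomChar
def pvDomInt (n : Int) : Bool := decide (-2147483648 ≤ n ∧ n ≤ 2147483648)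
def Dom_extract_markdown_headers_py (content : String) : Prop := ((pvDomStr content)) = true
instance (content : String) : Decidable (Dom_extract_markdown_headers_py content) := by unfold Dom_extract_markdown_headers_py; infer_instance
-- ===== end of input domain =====

-- B re-implements the markdown header counter as a single character-level scan with a
-- counts array (no split/strip per line, no dict accumulation); same output, alternative structure.


-- ===== PORT A =====
-- literal port of A: split on '\n', strip each line, count leading '#' (lstrip('#') is
-- dropWhile (· == '#'), exact), accumulate in the dict; headers[f'h{level}'] += 1 is modify
-- (the key is always present, so the default 0 is never used).
def extract_markdown_headers_py (content : String) : List (String × Int) :=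
  let headers : PySem.Dict String Int :=
    PySem.Dict.ofList [("h1", 0), ("h2", 0), ("h3", 0), ("h4", 0), ("h5", 0), ("h6", 0)]
  let headers := (PySem.Chars.splitOn content.toList ['\n']).foldl (fun headers line =>
    let line := PySem.Chars.strip line
    if PySem.Chars.startswith line ['#'] then
      let level : Int := (line.length : Int) - ((line.dropWhile (· == '#')).length : Int)
      if 1 ≤ level ∧ level ≤ 6 then
        headers.modify ("h" ++ PySem.Int.toStr level) 0 (· + 1)
      else headers
    else headers) headers
  headers.items

-- ===== PORT B =====
-- literal port of B (Source B): one pass over the characters; per line skip the leading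
-- whitespace run (isspace, stopping at '\n'), count the '#' run, bump counts[level],
-- then skip to just past the next '\n'.
def bWs (c : Char) : Bool := c ≠ '\n' && PySem.Chars.isspace c

def bGo (cs : List Char) (counts : List Int) : List Int :=
  match cs with
  | [] => counts
  | c0 :: t0 =>
    let cs1 := (c0 :: t0).dropWhile bWs
    let level := (cs1.takeWhile (· == '#')).length
    let cs2 := cs1.dropWhile (· == '#')
    let counts := if 1 ≤ level ∧ level ≤ 6 then counts.modify level (· + 1) else counts
    let cs3 := cs2.dropWhile (fun c => c ≠ '\n')
    if cs3.isEmpty then counts else bGo cs3.tail counts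
  termination_by cs.length
  decreasing_by
    have h1 := List.length_dropWhile_le bWs (c0 :: t0)
    have h2 := List.length_dropWhile_le (· == '#') ((c0 :: t0).dropWhile bWs)
    have h3 := List.length_dropWhile_le (fun c => decide (c ≠ '\n'))
      (((c0 :: t0).dropWhile bWs).dropWhile (· == '#'))
    have h4 : cs3 ≠ [] := by simpa [List.isEmpty_iff] using ‹¬cs3.isEmpty = true›
    have h5 := List.length_tail (l := cs3)
    have h6 : 1 ≤ cs3.length := by
      cases hc : cs3 with
      | nil => exact absurd hc h4
      | cons a b => simp [hc]
    simp only [cs3, cs2, cs1] at h5 h6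
    simp only [List.length_cons] at h1 ⊢
    omega

def extract_markdown_headers_py_alt (content : String) : List (String × Int) :=
  let counts := bGo content.toList [0, 0, 0, 0, 0, 0, 0]
  (PySem.List.pyRange 1 7 1).map (fun k => ("h" ++ PySem.Int.toStr k, PySem.List.pyGetD counts k 0))

-- ===== PRECONDITION & SPEC =====
def Spec_extract_markdown_headers_py (content : String) (out : List (String × Int)) : Prop := out = extract_markdown_headers_py_alt content
instance (content : String) (out : List (String × Int)) : Decidable (Spec_extract_markdown_headers_py content out) := by unfold Spec_extract_markdown_headers_py; infer_instance

-- ===== CLAIM (what is proved, stated in full; the proofs are below) =====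
def Claim_equal_extract_markdown_headers_py : Prop := ∀ (content : String), Dom_extract_markdown_headers_py content → Spec_extract_markdown_headers_py content (extract_markdown_headers_py content)

-- ===== LEMMAS AND PROOFS =====

-- the lines of cs, as Python's split('\n') produces them
def pvLines : List Char → List (List Char)
  | [] => [[]]
  | c :: rest =>
    if c = '\n' then [] :: pvLines rest
    else match pvLines rest with
      | [] => [[c]]
      | l :: ls => (c :: l) :: ls

-- header level of one line, as B computes it
def pvLvl (l : List Char) : Nat := ((l.dropWhile bWs).takeWhile (· == '#')).length

-- canonical per-line step functions
def stepA (d : PySem.Dict String Int) (l : List Char) : PySem.Dict String Int :=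
  if 1 ≤ pvLvl l ∧ pvLvl l ≤ 6 then d.modify ("h" ++ PySem.Int.toStr (pvLvl l : Int)) 0 (· + 1) else d

def stepB (counts : List Int) (l : List Char) : List Int :=
  if 1 ≤ pvLvl l ∧ pvLvl l ≤ 6 then counts.modify (pvLvl l) (· + 1) else counts

def pvCnt (k : Nat) (ls : List (List Char)) : Nat := ls.countP (fun l => pvLvl l = k)

theorem pvLines_ne_nil (cs : List Char) : pvLines cs ≠ [] := by
  cases cs with
  | nil => simp [pvLines]
  | cons c rest =>
    simp only [pvLines]
    split
    · simp
    · split <;> simp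

theorem splitOn_go_eq (l : List Char) : ∀ (fuel : Nat) (cur : List Char) (acc : List (List Char)),
    l.length < fuel →
    PySem.Chars.splitOn.go ['\n'] fuel l cur acc =
      acc.reverse ++ (match pvLines l with
        | [] => []
        | h :: t => (cur.reverse ++ h) :: t) := by
  induction l with
  | nil =>
    intro fuel cur acc hf
    match fuel, hf with
    | fuel + 1, _ => simp [PySem.Chars.splitOn.go, pvLines]
  | cons c rest ih =>
    intro fuel cur acc hf
    match fuel, hf with
    | fuel + 1, hf =>
      rw [PySem.Chars.splitOn.go]
      by_cases hc : c = '\n'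
      · subst hc
        have hpre : List.isPrefixOf ['\n'] ('\n' :: rest) = true := by simp [List.isPrefixOf]
        rw [if_pos hpre]
        simp only [List.length_cons, List.length_nil, List.drop_succ_cons, List.drop_zero]
        rw [ih fuel [] (cur.reverse :: acc) (by simpa using Nat.lt_of_succ_lt_succ hf)]
        have hne := pvLines_ne_nil rest
        have hnl : pvLines ('\n' :: rest) = [] :: pvLines rest := by rw [pvLines]; simp
        cases hpl : pvLines rest with
        | nil => exact absurd hpl hne
        | cons h t => rw [hnl, hpl]; simp
      · have hpre : List.isPrefixOf ['\n'] (c :: rest) = false := by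
          simp [List.isPrefixOf, Ne.symm hc]
        rw [if_neg (by simp [hpre])]
        rw [ih fuel (c :: cur) acc (by simpa using Nat.lt_of_succ_lt_succ hf)]
        have hne := pvLines_ne_nil rest
        cases hpl : pvLines rest with
        | nil => exact absurd hpl hne
        | cons h t => simp [pvLines, hc, hpl]

theorem splitOn_eq (cs : List Char) : PySem.Chars.splitOn cs ['\n'] = pvLines cs := by
  rw [PySem.Chars.splitOn, splitOn_go_eq cs (cs.length + 1) [] [] (by omega)]
  cases hpl : pvLines cs with
  | nil => exact absurd hpl (pvLines_ne_nil cs)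
  | cons h t => simp

theorem mem_pvLines_no_nl (cs : List Char) : ∀ l ∈ pvLines cs, '\n' ∉ l := by
  induction cs with
  | nil => intro l hl; simp [pvLines] at hl; simp [hl]
  | cons c rest ih =>
    intro l hl
    by_cases hc : c = '\n'
    · subst hc
      simp only [pvLines, reduceIte] at hl
      rcases List.mem_cons.mp hl with h | h
      · simp [h]
      · exact ih l h
    · simp only [pvLines, if_neg hc] at hl
      cases hpl : pvLines rest with
      | nil => exact absurd hpl (pvLines_ne_nil rest)
      | cons h t =>
        rw [hpl] at hl
        rcases List.mem_cons.mp hl with h' | h'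
        · subst h'
          intro hmem
          rcases List.mem_cons.mp hmem with h'' | h''
          · exact hc h''.symm
          · exact ih h (by rw [hpl]; exact List.mem_cons_self) h''
        · exact ih l (by rw [hpl]; exact List.mem_cons.mpr (Or.inr h'))

theorem dropWhile_eq_cons_head {p : Char → Bool} {l : List Char} {b : Char} {r : List Char}
    (h : l.dropWhile p = b :: r) : p b = false := by
  induction l with
  | nil => simp at h
  | cons c t ih =>
    by_cases hc : p c
    · rw [List.dropWhile_cons_of_pos hc] at h; exact ih h
    · rw [List.dropWhile_cons_of_neg hc] at h
      cases h
      simpa using hc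

-- takeWhile/dropWhile across a failing separator
theorem takeWhile_append_cons {p : Char → Bool} (l : List Char) (b : Char) (r : List Char)
    (hb : p b = false) : (l ++ b :: r).takeWhile p = l.takeWhile p := by
  induction l with
  | nil => simp [List.takeWhile, hb]
  | cons c t ih =>
    by_cases hc : p c <;> simp [hc, ih]

theorem dropWhile_append_cons {p : Char → Bool} (l : List Char) (b : Char) (r : List Char)
    (hb : p b = false) : (l ++ b :: r).dropWhile p = l.dropWhile p ++ b :: r := by
  induction l with
  | nil => simp [List.dropWhile, hb]
  | cons c t ih =>
    by_cases hc : p c <;> simp [hc, ih]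

theorem dropWhile_congr' {p q : Char → Bool} (l : List Char)
    (h : ∀ c ∈ l, p c = q c) : l.dropWhile p = l.dropWhile q := by
  induction l with
  | nil => rfl
  | cons c t ih =>
    have hc := h c (by simp)
    by_cases hp : p c
    · rw [List.dropWhile_cons_of_pos hp, List.dropWhile_cons_of_pos (by rw [← hc]; exact hp)]
      exact ih fun c hc => h c (by simp [hc])
    · rw [List.dropWhile_cons_of_neg hp,
        List.dropWhile_cons_of_neg (by rw [← hc]; simpa using hp)]

theorem takeWhile_eq_nil_of_all_neg {p : Char → Bool} {v : List Char}
    (h : ∀ c ∈ v, p c = false) : v.takeWhile p = [] := by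
  cases v with
  | nil => rfl
  | cons c t => rw [List.takeWhile_cons_of_neg (by simp [h c (by simp)])]

-- removing trailing whitespace does not change the leading '#'-run
theorem takeWhile_hash_rstrip (x : List Char) :
    (PySem.Chars.rstrip x).takeWhile (· == '#') = x.takeWhile (· == '#') := by
  have hx : PySem.Chars.rstrip x ++ (x.reverse.takeWhile PySem.Chars.isspace).reverse = x := by
    rw [PySem.Chars.rstrip, ← List.reverse_append, List.takeWhile_append_dropWhile,
      List.reverse_reverse]
  have hv : ∀ c ∈ (x.reverse.takeWhile PySem.Chars.isspace).reverse, (c == '#') = false := by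
    intro c hc
    have hsp : PySem.Chars.isspace c = true :=
      List.mem_takeWhile_imp (List.mem_reverse.mp hc)
    have : c ≠ '#' := by
      intro h; subst h; simp [PySem.Chars.isspace] at hsp
    simpa using this
  conv_rhs => rw [← hx]
  rw [List.takeWhile_append]
  split
  · rename_i hlen
    have heq : (PySem.Chars.rstrip x).takeWhile (· == '#') = PySem.Chars.rstrip x :=
      (List.takeWhile_prefix _).eq_of_length hlen
    rw [takeWhile_eq_nil_of_all_neg hv, heq, List.append_nil]
  · rfl

-- per-line: A's stripped line has the same leading '#'-run as B's whitespace-skipped line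
theorem lvl_strip (l : List Char) (h : '\n' ∉ l) :
    (PySem.Chars.strip l).takeWhile (· == '#') = (l.dropWhile bWs).takeWhile (· == '#') := by
  rw [PySem.Chars.strip, takeWhile_hash_rstrip, PySem.Chars.lstrip]
  congr 1
  refine (dropWhile_congr' l fun c hc => ?_).symm
  have : c ≠ '\n' := fun he => h (he ▸ hc)
  simp [bWs, this]

theorem stepA_eq (d : PySem.Dict String Int) (l : List Char) (h : '\n' ∉ l) :
    (let line := PySem.Chars.strip l
     if PySem.Chars.startswith line ['#'] then
       let level : Int := (line.length : Int) - ((line.dropWhile (· == '#')).length : Int)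
       if 1 ≤ level ∧ level ≤ 6 then
         d.modify ("h" ++ PySem.Int.toStr level) 0 (· + 1)
       else d
     else d) = stepA d l := by
  have hlvl := lvl_strip l h
  have hlen : (PySem.Chars.strip l).length =
      ((PySem.Chars.strip l).takeWhile (· == '#')).length +
      ((PySem.Chars.strip l).dropWhile (· == '#')).length := by
    conv_lhs => rw [← List.takeWhile_append_dropWhile (p := (· == '#')) (l := PySem.Chars.strip l)]
    exact List.length_append
  have hlevel : ((PySem.Chars.strip l).length : Int) -
      (((PySem.Chars.strip l).dropWhile (· == '#')).length : Int) = (pvLvl l : Int) := by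
    rw [pvLvl, ← hlvl]; omega
  by_cases hs : PySem.Chars.startswith (PySem.Chars.strip l) ['#']
  · simp only [hs, if_true, hlevel, stepA]
    have : ((1 : Int) ≤ (pvLvl l : Int) ∧ (pvLvl l : Int) ≤ 6) ↔ (1 ≤ pvLvl l ∧ pvLvl l ≤ 6) := by
      omega
    rw [if_congr this rfl rfl]
  · have hz : pvLvl l = 0 := by
      rw [pvLvl, ← hlvl]
      cases hst : PySem.Chars.strip l with
      | nil => simp
      | cons a t =>
        have : ¬ (a == '#') = true := by
          intro ha
          apply hs
          rw [PySem.Chars.startswith]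
          have : a = '#' := by simpa using ha
          simp [hst, this, List.isPrefixOf]
        rw [List.takeWhile_cons]
        simp [this]
    simp only [hs, stepA, hz]
    simp

-- B's scan is the fold of stepB over the lines
theorem pvLines_no_nl (cs : List Char) (h : '\n' ∉ cs) : pvLines cs = [cs] := by
  induction cs with
  | nil => rfl
  | cons c rest ih =>
    have hc : c ≠ '\n' := fun he => h (he ▸ List.mem_cons_self)
    have hrest : '\n' ∉ rest := fun hm => h (List.mem_cons.mpr (Or.inr hm))
    simp only [pvLines, if_neg hc, ih hrest]

theorem pvLines_append (l : List Char) (r : List Char) (h : '\n' ∉ l) :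
    pvLines (l ++ '\n' :: r) = l :: pvLines r := by
  induction l with
  | nil => simp [pvLines]
  | cons c t ih =>
    have hc : c ≠ '\n' := fun he => h (he ▸ List.mem_cons_self)
    have ht : '\n' ∉ t := fun hm => h (List.mem_cons.mpr (Or.inr hm))
    simp only [List.cons_append, pvLines, if_neg hc, ih ht]

theorem bGo_eq_fold : ∀ (n : Nat) (cs : List Char) (counts : List Int), cs.length ≤ n →
    bGo cs counts = (pvLines cs).foldl stepB counts := by
  intro n
  induction n with
  | zero =>
    intro cs counts hlen
    have : cs = [] := by cases cs <;> simp_all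
    subst this
    simp [bGo, pvLines, stepB, pvLvl]
  | succ n ih =>
    intro cs counts hlen
    match cs with
    | [] => simp [bGo, pvLines, stepB, pvLvl]
    | c0 :: t0 =>
      rw [bGo]
      by_cases hmem : '\n' ∈ c0 :: t0
      · -- split off the first line
        cases hd : (c0 :: t0).dropWhile (fun c => c ≠ '\n') with
        | nil =>
          exfalso
          have := List.dropWhile_eq_nil_iff.mp hd '\n' hmem
          simp at this
        | cons b r =>
          have hb : b = '\n' := by
            have := dropWhile_eq_cons_head hd
            simpa using this
          subst hb
          have hsplit : c0 :: t0 = ((c0 :: t0).takeWhile (fun c => c ≠ '\n')) ++ '\n' :: r := by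
            conv_lhs => rw [← List.takeWhile_append_dropWhile (p := fun c => c ≠ '\n')
              (l := c0 :: t0)]
            rw [hd]
          set l := (c0 :: t0).takeWhile (fun c => c ≠ '\n') with hldef
          have hlnl : '\n' ∉ l := by
            intro hm
            have := List.mem_takeWhile_imp hm
            simp at this
          have hws : bWs '\n' = false := by decide
          have hhash : (('\n' : Char) == '#') = false := by decide
          have hcs1 : (c0 :: t0).dropWhile bWs = l.dropWhile bWs ++ '\n' :: r := by
            conv_lhs => rw [hsplit]
            exact dropWhile_append_cons (p := bWs) _ _ _ hws
          have hlevel : (((c0 :: t0).dropWhile bWs).takeWhile (· == '#')).length = pvLvl l := by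
            rw [hcs1, takeWhile_append_cons (p := (· == '#')) _ _ _ hhash, pvLvl]
          have hcs2 : ((c0 :: t0).dropWhile bWs).dropWhile (· == '#') =
              (l.dropWhile bWs).dropWhile (· == '#') ++ '\n' :: r := by
            rw [hcs1]
            exact dropWhile_append_cons (p := (· == '#')) _ _ _ hhash
          have hinner : ((l.dropWhile bWs).dropWhile (· == '#')).dropWhile (fun c => c ≠ '\n') = [] := by
            apply List.dropWhile_eq_nil_iff.mpr
            intro x hx
            have hxl : x ∈ l := List.Sublist.mem hx
              ((List.dropWhile_sublist _).trans (List.dropWhile_sublist _))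
            have : x ≠ '\n' := fun he => hlnl (he ▸ hxl)
            simpa using this
          have hcs3 : (((c0 :: t0).dropWhile bWs).dropWhile (· == '#')).dropWhile (fun c => c ≠ '\n')
              = '\n' :: r := by
            rw [hcs2, dropWhile_append_cons _ _ _ (by simp), hinner]
            · simp
          simp only [hlevel, hcs3, List.isEmpty_cons, List.tail_cons]
          have hrlen : r.length ≤ n := by
            have hL := congrArg List.length hsplit
            simp only [List.length_append, List.length_cons] at hL hlen
            omega
          rw [ih r _ hrlen]
          conv_rhs => rw [hsplit, pvLines_append l r hlnl]
          rw [List.foldl_cons]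
          rfl
      · -- single line, no newline
        have hcs3 : (((c0 :: t0).dropWhile bWs).dropWhile (· == '#')).dropWhile (fun c => c ≠ '\n')
            = [] := by
          apply List.dropWhile_eq_nil_iff.mpr
          intro x hx
          have hxl : x ∈ c0 :: t0 := List.Sublist.mem hx
            ((List.dropWhile_sublist _).trans (List.dropWhile_sublist _))
          have : x ≠ '\n' := fun he => hmem (he ▸ hxl)
          simpa using this
        simp only [hcs3, List.isEmpty_nil, if_true]
        rw [pvLines_no_nl _ hmem, List.foldl_cons, List.foldl_nil]
        rfl

-- key names are distinct on levels 1..6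
theorem hKey_inj (j k : Nat) (hj1 : 1 ≤ j) (hj6 : j ≤ 6) (hk1 : 1 ≤ k) (hk6 : k ≤ 6) :
    ("h" ++ PySem.Int.toStr (j : Int) = "h" ++ PySem.Int.toStr (k : Int)) ↔ j = k := by
  interval_cases j <;> interval_cases k <;> simp <;> decide

theorem keys_insert_of_contains {d : PySem.Dict String Int} {k : String} (v : Int)
    (h : d.contains k = true) : (d.insert k v).keys = d.keys := by
  simp only [PySem.Dict.keys, PySem.Dict.items_insert_of_contains d v h, List.map_map]
  apply List.map_congr_left
  intro p _
  by_cases hp : p.1 = k <;> simp [hp]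

theorem keys_stepA (d : PySem.Dict String Int) (l : List Char)
    (h : d.keys = ["h1", "h2", "h3", "h4", "h5", "h6"]) :
    (stepA d l).keys = ["h1", "h2", "h3", "h4", "h5", "h6"] := by
  rw [stepA]
  split
  · rename_i hcond
    rw [PySem.Dict.keys_modify, keys_insert_of_contains _ ?_, h]
    rw [PySem.Dict.contains_eq_decide_mem_keys, h]
    obtain ⟨h1, h6⟩ := hcond
    set k := pvLvl l
    interval_cases k <;> decide
  · exact h

theorem keys_foldA (ls : List (List Char)) (d : PySem.Dict String Int)
    (h : d.keys = ["h1", "h2", "h3", "h4", "h5", "h6"]) :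
    (ls.foldl stepA d).keys = ["h1", "h2", "h3", "h4", "h5", "h6"] := by
  induction ls generalizing d with
  | nil => exact h
  | cons l ls ih => exact ih _ (keys_stepA d l h)

theorem getD_foldA (ls : List (List Char)) (d : PySem.Dict String Int) (k : Nat)
    (hk1 : 1 ≤ k) (hk6 : k ≤ 6) :
    (ls.foldl stepA d).getD ("h" ++ PySem.Int.toStr (k : Int)) 0 =
      d.getD ("h" ++ PySem.Int.toStr (k : Int)) 0 + (pvCnt k ls : Int) := by
  induction ls generalizing d with
  | nil => simp [pvCnt]
  | cons l ls ih =>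
    rw [List.foldl_cons, ih (stepA d l)]
    have hcnt : (pvCnt k (l :: ls) : Int) = (pvCnt k ls : Int) + (if pvLvl l = k then 1 else 0) := by
      simp only [pvCnt, List.countP_cons]
      split <;> simp_all
    rw [hcnt, stepA]
    split
    · rename_i hcond
      rw [PySem.Dict.getD_modify]
      by_cases heq : pvLvl l = k
      · rw [if_pos, if_pos heq]
        · rw [heq]; ring
        · rw [hKey_inj k (pvLvl l) hk1 hk6 hcond.1 hcond.2]; omega
      · rw [if_neg, if_neg heq]
        · ring
        · rw [hKey_inj k (pvLvl l) hk1 hk6 hcond.1 hcond.2]; omega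
    · rename_i hcond
      have : pvLvl l ≠ k := by omega
      rw [if_neg this]
      ring

theorem length_stepB (counts : List Int) (l : List Char) : (stepB counts l).length = counts.length := by
  rw [stepB]; split <;> simp

theorem length_foldB (ls : List (List Char)) (counts : List Int) :
    (ls.foldl stepB counts).length = counts.length := by
  induction ls generalizing counts with
  | nil => rfl
  | cons l ls ih => rw [List.foldl_cons, ih, length_stepB]

theorem getD_foldB (ls : List (List Char)) (counts : List Int) (k : Nat)
    (hk1 : 1 ≤ k) (hk6 : k ≤ 6) (hklen : k < counts.length) :
    (ls.foldl stepB counts).getD k 0 = counts.getD k 0 + (pvCnt k ls : Int) := by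
  induction ls generalizing counts with
  | nil => simp [pvCnt]
  | cons l ls ih =>
    rw [List.foldl_cons, ih (stepB counts l) (by rw [length_stepB]; exact hklen)]
    have hcnt : (pvCnt k (l :: ls) : Int) = (pvCnt k ls : Int) + (if pvLvl l = k then 1 else 0) := by
      simp only [pvCnt, List.countP_cons]
      split <;> simp_all
    rw [hcnt, stepB]
    split
    · rename_i hcond
      by_cases heq : pvLvl l = k
      · rw [if_pos heq]
        rw [List.getD_eq_getElem?_getD, List.getElem?_modify, heq]
        cases hkk : counts[k]? with
        | none => exact absurd (List.getElem?_eq_none_iff.mp hkk) (by omega)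
        | some v =>
          simp [hkk, List.getD_eq_getElem?_getD]
          try omega
      · rw [if_neg heq]
        rw [List.getD_eq_getElem?_getD, List.getElem?_modify]
        cases hkk : counts[k]? with
        | none => exact absurd (List.getElem?_eq_none_iff.mp hkk) (by omega)
        | some v =>
          simp [hkk, heq, List.getD_eq_getElem?_getD]
          try omega
    · rename_i hcond
      have : pvLvl l ≠ k := by omega
      rw [if_neg this]
      ring

-- ===== VERDICT (by name: the statement is the Claim_ definition above) =====
theorem extract_markdown_headers_py_spec : Claim_equal_extract_markdown_headers_py := by
  intro content _
  rw [Spec_extract_markdown_headers_py]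
  set cs := content.toList with hcs
  -- A side
  rw [extract_markdown_headers_py]
  simp only
  rw [splitOn_eq]
  rw [PySem.List.foldl_congr_mem (pvLines cs) _ stepA _
    (fun d l hl => stepA_eq d l (mem_pvLines_no_nl cs l hl))]
  set d0 : PySem.Dict String Int :=
    PySem.Dict.ofList [("h1", 0), ("h2", 0), ("h3", 0), ("h4", 0), ("h5", 0), ("h6", 0)] with hd0
  have hkeys0 : d0.keys = ["h1", "h2", "h3", "h4", "h5", "h6"] := by decide
  have hkeys := keys_foldA (pvLines cs) d0 hkeys0
  have hnodup : ((pvLines cs).foldl stepA d0).keys.Nodup := by rw [hkeys]; decide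
  rw [PySem.Dict.items_eq_map_keys _ hnodup 0, hkeys]
  -- B side
  rw [extract_markdown_headers_py_alt]
  rw [bGo_eq_fold cs.length cs _ le_rfl]
  set cB : List Int := List.foldl stepB [0, 0, 0, 0, 0, 0, 0] (pvLines cs) with hcB
  have hlen7 : cB.length = 7 := by rw [hcB, length_foldB]; rfl
  have hval : ∀ k : Nat, 1 ≤ k → k ≤ 6 →
      (List.foldl stepA d0 (pvLines cs)).getD ("h" ++ PySem.Int.toStr (k : Int)) 0 =
      PySem.List.pyGetD cB ((k : Nat) : Int) 0 := by
    intro k h1 h6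
    rw [PySem.List.pyGetD_natCast, hcB,
      getD_foldB (pvLines cs) _ k h1 h6 (by simp; omega),
      getD_foldA (pvLines cs) d0 k h1 h6]
    have hz : ([0, 0, 0, 0, 0, 0, 0] : List Int).getD k 0 = 0 := by
      interval_cases k <;> rfl
    have hz0 : d0.getD ("h" ++ PySem.Int.toStr (k : Int)) 0 = 0 := by
      rw [hd0]; interval_cases k <;> decide
    rw [hz, hz0]
  have hv1 := hval 1 (by omega) (by omega)
  have hv2 := hval 2 (by omega) (by omega)
  have hv3 := hval 3 (by omega) (by omega)
  have hv4 := hval 4 (by omega) (by omega)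
  have hv5 := hval 5 (by omega) (by omega)
  have hv6 := hval 6 (by omega) (by omega)
  push_cast at hv1 hv2 hv3 hv4 hv5 hv6
  rw [show PySem.List.pyRange 1 7 = [1, 2, 3, 4, 5, 6] from by decide]
  simp only [List.map_cons, List.map_nil, List.cons.injEq, Prod.mk.injEq, and_true]
  refine ⟨⟨by decide, ?_⟩, ⟨by decide, ?_⟩, ⟨by decide, ?_⟩, ⟨by decide, ?_⟩,
    ⟨by decide, ?_⟩, ⟨by decide, ?_⟩⟩
  · rw [show ("h1" : String) = "h" ++ PySem.Int.toStr 1 from by decide]; exact hv1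
  · rw [show ("h2" : String) = "h" ++ PySem.Int.toStr 2 from by decide]; exact hv2
  · rw [show ("h3" : String) = "h" ++ PySem.Int.toStr 3 from by decide]; exact hv3
  · rw [show ("h4" : String) = "h" ++ PySem.Int.toStr 4 from by decide]; exact hv4
  · rw [show ("h5" : String) = "h" ++ PySem.Int.toStr 5 from by decide]; exact hv5
  · rw [show ("h6" : String) = "h" ++ PySem.Int.toStr 6 from by decide]; exact hv6
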